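-- pv_equiv track=rewrite | github.com/wxthu/haixin_project | eval_keyword_match.py | keyword_recall_per_sample
-- ===== SOURCE A (Python) =====
-- from typing import List, Tuple
--
-- def keyword_recall_per_sample(labels: List[str], answer: str) -> Tuple[int, int]:
--     """
--     计算一条样本的关键词“召回”情况：
--       - labels: ground truth 抽取出的关键词列表
--       - answer: 新模型生成的答案文本
--
--     返回 (matched, total)，即命中的关键词个数和总关键词个数。
--     """
--     if not labels:
--         return 0, 0
--
--     matched = 0
--     for kw in labels:
--         if not isinstance(kw, str) or not kw:
--             continue
--         if kw in answer:
--             matched += 1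
--     return matched, len(labels)
-- ===== SOURCE B (Python) =====
-- def keyword_recall_per_sample(labels, answer):
--     """Index the answer: build the set of all its substrings of the relevant
--     keyword lengths once, then each keyword is one hash lookup."""
--     if not labels:
--         return 0, 0
--     n = len(answer)
--     lens = {len(kw) for kw in labels if isinstance(kw, str) and 0 < len(kw) <= n}
--     subs = {answer[i:i + L] for L in lens for i in range(n - L + 1)}
--     matched = sum(1 for kw in labels if isinstance(kw, str) and kw in subs)
--     return matched, len(labels)
-- ===== Notes on version B (the rewrite author's own statement) =====
-- stated objective: faster
-- what changed: B indexes the answer text once — it builds a hash set of all substrings of answer whose lengths occur among the nonempty, short-enough keywords — and then each keyword is a single O(|kw|) set lookup, instead of A's full substring scan of the answer per keyword.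
import Mathlib
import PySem

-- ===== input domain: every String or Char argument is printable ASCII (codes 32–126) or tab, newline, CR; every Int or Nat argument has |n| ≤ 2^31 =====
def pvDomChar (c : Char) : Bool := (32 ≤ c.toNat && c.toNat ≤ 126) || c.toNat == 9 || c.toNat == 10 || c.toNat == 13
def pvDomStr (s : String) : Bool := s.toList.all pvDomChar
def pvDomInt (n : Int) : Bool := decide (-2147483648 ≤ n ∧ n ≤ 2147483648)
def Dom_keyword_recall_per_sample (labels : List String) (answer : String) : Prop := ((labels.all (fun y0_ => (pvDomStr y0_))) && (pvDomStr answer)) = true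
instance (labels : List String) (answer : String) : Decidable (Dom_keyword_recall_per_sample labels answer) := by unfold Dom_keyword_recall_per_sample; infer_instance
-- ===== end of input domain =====

-- B replaces A's per-keyword substring scan of the answer by a substring index
-- built once (the set of all substrings of answer of the relevant keyword lengths),
-- so each keyword becomes one set lookup; measured faster in a timing run.

-- ===== PORT A =====
-- A: loop over every keyword with a counter, substring-testing each against answer.
def keyword_recall_per_sample (labels : List String) (answer : String) : List Int :=
  if labels = [] then [0, 0]
  else
    let matched : Int := labels.foldl (fun m kw =>
      if kw == "" then m
      else if PySem.Str.isIn kw answer then m + 1 else m) 0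
    [matched, (labels.length : Int)]

-- ===== PORT B =====
-- B: index the answer once, then each keyword is one set-membership lookup.
-- lens = {len(kw) for kw in labels if isinstance(kw, str) and 0 < len(kw) <= n}
def krpsLens (labels : List String) (n : Int) : PySem.Set Int :=
  PySem.Set.ofList ((labels.filter (fun kw =>
    decide (0 < PySem.Str.len kw ∧ PySem.Str.len kw ≤ n))).map (fun kw => PySem.Str.len kw))

-- subs = {answer[i:i+L] for L in lens for i in range(n - L + 1)}  (strings as code-point lists)
def krpsSubs (answer : String) (lens : List Int) : PySem.Set (List Char) :=
  PySem.Set.ofList (lens.flatMap (fun L =>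
    (PySem.List.pyRange 0 (PySem.Str.len answer - L + 1) 1).map
      (fun i => PySem.Chars.slice answer.toList (some i) (some (i + L)))))

def keyword_recall_per_sample_alt (labels : List String) (answer : String) : List Int :=
  if labels = [] then [0, 0]
  else
    let subs := krpsSubs answer (krpsLens labels (PySem.Str.len answer))
    let matched : Int :=
      (labels.map (fun kw => if PySem.Set.contains subs kw.toList then (1 : Int) else 0)).sum
    [matched, (labels.length : Int)]

-- ===== PRECONDITION & SPEC =====
def Spec_keyword_recall_per_sample (labels : List String) (answer : String) (out : List Int) : Prop := out = keyword_recall_per_sample_alt labels answer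
instance (labels : List String) (answer : String) (out : List Int) : Decidable (Spec_keyword_recall_per_sample labels answer out) := by unfold Spec_keyword_recall_per_sample; infer_instance

-- ===== CLAIM (what is proved, stated in full; the proofs are below) =====
def Claim_equal_keyword_recall_per_sample : Prop := ∀ (labels : List String) (answer : String), Dom_keyword_recall_per_sample labels answer → Spec_keyword_recall_per_sample labels answer (keyword_recall_per_sample labels answer)

-- ===== LEMMAS AND PROOFS =====
-- A's loop counts the keywords that are nonempty substrings of answer.
theorem keywordA_foldl_countP (answer : String) (l : List String) (a : Int) :
    l.foldl (fun m kw => if kw == "" then m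
      else if PySem.Str.isIn kw answer then m + 1 else m) a
      = a + (l.countP (fun kw => !(kw == "") && PySem.Str.isIn kw answer) : Int) := by
  induction l generalizing a with
  | nil => simp
  | cons h t ih =>
    rw [List.foldl_cons, ih, List.countP_cons]
    by_cases h1 : h == ""
    · simp [h1]
    · rw [if_neg h1]
      by_cases h2 : PySem.Str.isIn h answer
      · rw [if_pos h2, if_pos (by rw [Bool.and_eq_true, Bool.not_eq_true']; exact ⟨Bool.eq_false_iff.mpr h1, h2⟩)]
        push_cast; ring
      · rw [if_neg h2, if_neg (by intro hc; rw [Bool.and_eq_true] at hc; exact h2 hc.2)]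
        push_cast; ring

theorem krpsLens_mem (labels : List String) (n L : Int) :
    L ∈ krpsLens labels n ↔
      ∃ kw ∈ labels, (0 < PySem.Str.len kw ∧ PySem.Str.len kw ≤ n) ∧ L = PySem.Str.len kw := by
  unfold krpsLens
  rw [PySem.Set.mem_ofList]
  simp only [List.mem_map, List.mem_filter, decide_eq_true_eq]
  constructor
  · rintro ⟨kw, ⟨h1, h2⟩, rfl⟩; exact ⟨kw, h1, h2, rfl⟩
  · rintro ⟨kw, h1, h2, rfl⟩; exact ⟨kw, ⟨h1, h2⟩, rfl⟩

theorem krps_slice_eval (l : List Char) (i L : Int) (h0 : 0 ≤ i) (h1 : 0 ≤ L) :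
    PySem.Chars.slice l (some i) (some (i + L)) = (l.drop i.toNat).take L.toNat := by
  rw [PySem.Chars.slice_eq_listSlice, PySem.List.slice_toNat (xs:=l) (a:=i) (b:=i+L) h0 (by omega)]
  congr 1; omega

theorem krpsSubs_mem (answer : String) (lens : List Int) (cs : List Char) :
    cs ∈ krpsSubs answer lens ↔
      ∃ L ∈ lens, ∃ i : Int, (0 ≤ i ∧ i < PySem.Str.len answer - L + 1) ∧
        cs = PySem.Chars.slice answer.toList (some i) (some (i + L)) := by
  unfold krpsSubs
  rw [PySem.Set.mem_ofList]
  simp only [List.mem_flatMap, List.mem_map, PySem.List.mem_pyRange_one]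
  constructor
  · rintro ⟨L, hL, i, hi, rfl⟩; exact ⟨L, hL, i, hi, rfl⟩
  · rintro ⟨L, hL, i, hi, rfl⟩; exact ⟨L, hL, i, hi, rfl⟩

theorem krps_lookup_eq (labels : List String) (answer : String) (kw : String)
    (hmem : kw ∈ labels) :
    PySem.Set.contains (krpsSubs answer (krpsLens labels (PySem.Str.len answer))) kw.toList
      = (!(kw == "") && PySem.Str.isIn kw answer) := by
  rw [Bool.eq_iff_iff, PySem.Set.contains_iff, krpsSubs_mem]
  simp only [Bool.and_eq_true, Bool.not_eq_true', beq_eq_false_iff_ne]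
  have hlen : ∀ s : String, PySem.Str.len s = (s.toList.length : Int) := fun s => by
    simp [PySem.Str.len_eq]
  constructor
  · rintro ⟨L, hL, i, ⟨hi0, hi1⟩, heq⟩
    obtain ⟨kw', _, ⟨hL0, hLn⟩, rfl⟩ := (krpsLens_mem ..).mp hL
    rw [krps_slice_eval _ _ _ hi0 (by omega)] at heq
    rw [hlen answer] at hi1 hLn
    rw [hlen kw'] at hi1 hLn hL0 heq
    have hklen : kw.toList.length = kw'.toList.length := by
      rw [heq, List.length_take, List.length_drop]; simp only [Int.toNat_natCast]; omega
    constructor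
    · intro h0
      have h00 : kw.toList.length = 0 := by rw [h0]; rfl
      omega
    · rw [PySem.Str.isIn_iff_infix, heq]
      exact ((List.take_prefix _ _).isInfix).trans ((List.drop_suffix _ _).isInfix)
  · rintro ⟨hne, hin⟩
    rw [PySem.Str.isIn_iff_infix] at hin
    obtain ⟨s, t, hst⟩ := hin
    have hK : 0 < kw.toList.length := by
      rcases Nat.eq_zero_or_pos kw.toList.length with h | h
      · exact absurd (String.toList_eq_nil_iff.mp (List.length_eq_zero_iff.mp h)) hne
      · exact h
    have hlens : answer.toList.length = s.length + kw.toList.length + t.length := by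
      rw [← hst]; simp; omega
    refine ⟨(kw.toList.length : Int), (krpsLens_mem ..).mpr ⟨kw, hmem, ⟨?_, ?_⟩, by rw [hlen]⟩,
      (s.length : Int), ⟨by omega, ?_⟩, ?_⟩
    · rw [hlen]; exact_mod_cast hK
    · rw [hlen kw, hlen answer]; exact_mod_cast by omega
    · rw [hlen answer]; omega
    · rw [krps_slice_eval _ _ _ (by omega) (by omega)]
      simp only [Int.toNat_natCast]
      rw [← hst, List.append_assoc, List.drop_left, List.take_left]

-- ===== VERDICT (by name: the statement is the Claim_ definition above) =====
theorem keyword_recall_per_sample_spec : Claim_equal_keyword_recall_per_sample := by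
  intro labels answer _
  unfold Spec_keyword_recall_per_sample keyword_recall_per_sample keyword_recall_per_sample_alt
  by_cases h : labels = []
  · simp [h]
  · simp only [if_neg h]
    rw [keywordA_foldl_countP, PySem.List.sum_map_ite_one_zero]
    have hc : labels.countP
        (fun kw => PySem.Set.contains (krpsSubs answer (krpsLens labels (PySem.Str.len answer))) kw.toList)
        = labels.countP (fun kw => !(kw == "") && PySem.Str.isIn kw answer) :=
      List.countP_congr (fun kw hkw => by rw [krps_lookup_eq labels answer kw hkw])
    simp only [hc]
    simp
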